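-- pv_equiv track=rewrite | github.com/zsbati/PycharmProjects | JumpingOnTheClouds/main.py | jumpingOnVClouds
-- ===== SOURCE A (Python) =====
-- def jumpingOnVClouds(c, k):
--     e = 100  # initial energy level
--     n = len(c)
--
--     place = k % n
--     if c[place] == 1:
--         e -= 3
--     else:
--         e -= 1
--
--     while place != 0:
--         place = (place + k) % n
--         if c[place] == 1:
--             e -= 3
--         else:
--             e -= 1
--
--     return e
-- ===== SOURCE B (Python) =====
-- def jumpingOnVClouds(c, k):
--     # The visited clouds are exactly the indices divisible by g = gcd(n, k);
--     # no jump simulation: one pass over the list counting thunderclouds there,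
--     # then a closed formula: 100 - (#visited) - 2*(#thunderclouds visited).
--     n = len(c)
--     g, r = n, k % n
--     while r:
--         g, r = r, g % r
--     ones = sum(1 for j, v in enumerate(c) if j % g == 0 and v == 1)
--     return 100 - n // g - 2 * ones
-- ===== Notes on version B (the rewrite author's own statement) =====
-- stated objective: alternative
-- what changed: B does not simulate the jump sequence at all: the set of visited clouds is exactly the indices divisible by g = gcd(n, k % n), so B makes one enumerate pass over the list counting thunderclouds at those indices and returns the closed formula 100 - n//g - 2*ones; A instead walks place = (place+k) % n until it returns to 0, decrementing energy per visit.
import Mathlib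
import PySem

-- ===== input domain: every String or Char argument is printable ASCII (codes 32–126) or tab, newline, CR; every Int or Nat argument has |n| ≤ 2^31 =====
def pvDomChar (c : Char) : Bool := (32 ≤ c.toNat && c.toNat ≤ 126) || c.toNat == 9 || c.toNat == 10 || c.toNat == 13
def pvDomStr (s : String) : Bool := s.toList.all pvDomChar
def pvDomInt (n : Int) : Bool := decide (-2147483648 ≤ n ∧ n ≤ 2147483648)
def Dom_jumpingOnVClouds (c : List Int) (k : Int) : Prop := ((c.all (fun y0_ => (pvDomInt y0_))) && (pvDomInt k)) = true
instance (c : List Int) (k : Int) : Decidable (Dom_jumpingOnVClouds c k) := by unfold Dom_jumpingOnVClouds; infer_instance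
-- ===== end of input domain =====

-- B replaces A's jump-by-jump simulation by one enumerate pass counting thunderclouds
-- at the indices divisible by gcd(n, k % n) and a closed formula; same result, no walk.

-- ===== PORT A =====
-- while loop ported with fuel c.length (proved sufficient under Pre_: the walk returns
-- to 0 after n/gcd(n,k) ≤ n visits); the fuel-out branch is a totality guard only.
def jloop (c : List Int) (k : Int) (fuel : Nat) (place : Int) (e : Int) : Int :=
  if place = 0 then e
  else
    match fuel with
    | 0 => e
    | f + 1 =>
      let place' := PySem.Int.mod (place + k) (PySem.List.len c)
      let e' := if (PySem.List.pyGet? c place').getD 0 = 1 then e - 3 else e - 1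
      jloop c k f place' e'

def jumpingOnVClouds (c : List Int) (k : Int) : Int :=
  let n := PySem.List.len c
  let place := PySem.Int.mod k n
  let e : Int := 100
  let e := if (PySem.List.pyGet? c place).getD 0 = 1 then e - 3 else e - 1
  jloop c k c.length place e

-- ===== PORT B =====
-- Euclid's gcd loop from Source B ('g, r = r, g % r'); its arguments are nonnegative, ported on Nat
def pyGcd : Nat → Nat → Nat
  | a, 0 => a
  | a, b + 1 => pyGcd (b + 1) (a % (b + 1))
termination_by a b => b
decreasing_by exact Nat.mod_lt _ (Nat.succ_pos b)

def jumpingOnVClouds_alt (c : List Int) (k : Int) : Int :=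
  let n := c.length
  let g := pyGcd n (PySem.Int.mod k (n : Int)).toNat
  -- sum(1 for j, v in enumerate(c) if j % g == 0 and v == 1)
  let ones := (PySem.List.enumerate c).foldl
    (fun s jv => if PySem.Int.mod jv.1 (g : Int) = 0 ∧ jv.2 = 1 then s + 1 else s) (0 : Int)
  100 - ((n / g : Nat) : Int) - 2 * ones

-- ===== PRECONDITION & SPEC =====
-- Pre_ excludes only the empty list, on which A raises ZeroDivisionError (k % 0).
def Pre_jumpingOnVClouds (c : List Int) (k : Int) : Prop := c ≠ []
instance (c : List Int) (k : Int) : Decidable (Pre_jumpingOnVClouds c k) := by unfold Pre_jumpingOnVClouds; infer_instance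
def pvWitness_jumpingOnVClouds : List Int × Int := ([0, 1, 0, 1], 2)

def Spec_jumpingOnVClouds (c : List Int) (k : Int) (out : Int) : Prop := out = jumpingOnVClouds_alt c k
instance (c : List Int) (k : Int) (out : Int) : Decidable (Spec_jumpingOnVClouds c k out) := by unfold Spec_jumpingOnVClouds; infer_instance

-- ===== CLAIM (what is proved, stated in full; the proofs are below) =====
def Claim_equal_jumpingOnVClouds : Prop := ∀ (c : List Int) (k : Int), Dom_jumpingOnVClouds c k → Pre_jumpingOnVClouds c k → Spec_jumpingOnVClouds c k (jumpingOnVClouds c k)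

-- ===== LEMMAS AND PROOFS =====

-- proof-only helpers: the walk's parameters
def pvK (c : List Int) (k : Int) : Nat := (PySem.Int.mod k (c.length : Int)).toNat
def pvG (c : List Int) (k : Int) : Nat := Nat.gcd c.length (pvK c k)
def pvP (c : List Int) (k : Int) (i : Nat) : Nat := (i * pvK c k) % c.length
def pvSteps (c : List Int) (k : Int) : Nat := c.length / pvG c k
def pvPosCost (c : List Int) (j : Nat) : Int :=
  if (PySem.List.pyGet? c ((j : Nat) : Int)).getD 0 = 1 then 3 else 1
def pvInd (c : List Int) (j : Nat) : Int :=
  if (PySem.List.pyGet? c ((j : Nat) : Int)).getD 0 = 1 then 1 else 0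
def pvCost (c : List Int) (k : Int) (j : Nat) : Int := pvPosCost c (pvP c k j)
def pvSum (c : List Int) (k : Int) : Nat → Nat → Int
  | _, 0 => 0
  | i, r + 1 => pvCost c k (i + 1) + pvSum c k (i + 1) r
def pvT (c : List Int) (k : Int) : Finset Nat :=
  (Finset.range c.length).filter (fun j => pvG c k ∣ j)

theorem pvK_spec (c : List Int) (k : Int) (hn : c ≠ []) :
    PySem.Int.mod k (c.length : Int) = (pvK c k : Int) ∧ pvK c k < c.length := by
  have hn0 : 0 < c.length := List.length_pos_of_ne_nil hn
  have h0 : (0:Int) < (c.length:Int) := by exact_mod_cast hn0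
  have h1 := PySem.Int.mod_nonneg k h0
  have h2 := PySem.Int.mod_lt k h0
  unfold pvK
  constructor
  · exact (Int.toNat_of_nonneg h1).symm
  · omega

theorem pvP_succ (c : List Int) (k : Int) (hn : c ≠ []) (i : Nat) :
    PySem.Int.mod ((pvP c k i : Int) + k) (c.length : Int) = (pvP c k (i + 1) : Int) := by
  obtain ⟨hK, _⟩ := pvK_spec c k hn
  have hn0 : 0 < c.length := List.length_pos_of_ne_nil hn
  have h0 : (0:Int) < (c.length:Int) := by exact_mod_cast hn0
  rw [PySem.Int.mod_eq_emod_of_pos h0] at hK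
  rw [PySem.Int.mod_eq_emod_of_pos h0]
  unfold pvP
  calc (((i * pvK c k) % c.length : Nat) + k : Int) % (c.length:Int)
      = (((i * pvK c k : Nat) : Int) % (c.length:Int) + k) % (c.length:Int) := by
        rw [Int.natCast_mod]
    _ = (((i * pvK c k : Nat) : Int) + k) % (c.length:Int) := Int.emod_add_emod _ _ _
    _ = (((i * pvK c k : Nat) : Int) + k % (c.length:Int)) % (c.length:Int) :=
        (Int.add_emod_emod _ _ _).symm
    _ = (((i+1) * pvK c k % c.length : Nat) : Int) := by
        rw [hK]; push_cast [Int.natCast_mod]; ring_nf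

theorem pv_nat_dvd (n K : Nat) (hn : 0 < n) (i : Nat) :
    n ∣ i * K ↔ (n / Nat.gcd n K) ∣ i := by
  set g := Nat.gcd n K with hg
  have hg0 : 0 < g := Nat.gcd_pos_of_pos_left _ hn
  have hcop : Nat.Coprime (n / g) (K / g) := Nat.coprime_div_gcd_div_gcd hg0
  have hn' : g * (n / g) = n := Nat.mul_div_cancel' (Nat.gcd_dvd_left n K)
  have hK' : g * (K / g) = K := Nat.mul_div_cancel' (Nat.gcd_dvd_right n K)
  constructor
  · intro h
    have heq : g * (i * (K/g)) = i * K := by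
      calc g * (i * (K/g)) = i * (g * (K/g)) := by ring
        _ = i * K := by rw [hK']
    have h' : g * (n/g) ∣ g * (i * (K/g)) := by rw [hn', heq]; exact h
    exact hcop.dvd_of_dvd_mul_right ((Nat.mul_dvd_mul_iff_left hg0).mp h')
  · rintro ⟨t, rfl⟩
    refine ⟨t * (K/g), ?_⟩
    calc (n/g * t) * K = (n/g * t) * (g * (K/g)) := by rw [hK']
      _ = (g * (n/g)) * (t * (K/g)) := by ring
      _ = n * (t * (K/g)) := by rw [hn']

theorem pv_dvd_iff (c : List Int) (k : Int) (hn : c ≠ []) (i : Nat) :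
    pvP c k i = 0 ↔ pvSteps c k ∣ i := by
  have hn0 : 0 < c.length := List.length_pos_of_ne_nil hn
  unfold pvP pvSteps pvG
  rw [← Nat.dvd_iff_mod_eq_zero]
  exact pv_nat_dvd _ _ hn0 i

theorem pvSteps_pos (c : List Int) (k : Int) (hn : c ≠ []) : 0 < pvSteps c k := by
  have hn0 : 0 < c.length := List.length_pos_of_ne_nil hn
  exact Nat.div_pos (Nat.le_of_dvd hn0 (Nat.gcd_dvd_left _ _)) (Nat.gcd_pos_of_pos_left _ hn0)

theorem pvSteps_le (c : List Int) (k : Int) : pvSteps c k ≤ c.length := Nat.div_le_self _ _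

theorem pyGcd_eq (a b : Nat) : pyGcd a b = Nat.gcd a b := by
  induction b using Nat.strong_induction_on generalizing a with
  | _ b ih =>
    match b with
    | 0 => simp [pyGcd]
    | b + 1 =>
      rw [pyGcd, ih (a % (b+1)) (Nat.mod_lt _ (Nat.succ_pos b)),
        Nat.gcd_comm (b+1), ← Nat.gcd_rec, Nat.gcd_comm]

theorem jloop_eq (c : List Int) (k : Int) (hn : c ≠ []) :
    ∀ (m i : Nat) (e : Int), 1 ≤ i → i ≤ pvSteps c k → pvSteps c k ≤ i + m →
      jloop c k m ((pvP c k i : Nat) : Int) e = e - pvSum c k i (pvSteps c k - i) := by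
  intro m
  induction m with
  | zero =>
    intro i e h1 h2 h3
    have hp : pvP c k i = 0 := (pv_dvd_iff c k hn i).mpr (by
      have : i = pvSteps c k := by omega
      exact this ▸ dvd_refl _)
    have h0 : pvSteps c k - i = 0 := by omega
    rw [jloop, if_pos (by exact_mod_cast hp), h0]
    simp [pvSum]
  | succ m ih =>
    intro i e h1 h2 h3
    by_cases hp : pvP c k i = 0
    · have hdvd := (pv_dvd_iff c k hn i).mp hp
      have hi : i = pvSteps c k := le_antisymm h2 (Nat.le_of_dvd (by omega) hdvd)
      have h0 : pvSteps c k - i = 0 := by omega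
      rw [jloop, if_pos (by exact_mod_cast hp), h0]
      simp [pvSum]
    · have hi : i < pvSteps c k :=
        lt_of_le_of_ne h2 (fun h => hp ((pv_dvd_iff c k hn i).mpr (h ▸ dvd_refl _)))
      rw [jloop]
      have hpz : ¬ ((pvP c k i : Int) = 0) := by exact_mod_cast hp
      simp only [hpz, if_false]
      rw [PySem.List.len_eq, pvP_succ c k hn i]
      rw [ih (i+1) _ (by omega) hi (by omega)]
      have hsub : pvSteps c k - i = (pvSteps c k - (i+1)) + 1 := by omega
      rw [hsub, pvSum]
      unfold pvCost pvPosCost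
      split <;> ring

-- pvSum as a Finset sum of per-visit costs
theorem pvSum_eq_sum (c : List Int) (k : Int) :
    ∀ (r i : Nat), pvSum c k i r = ∑ t ∈ Finset.range r, pvCost c k (i + 1 + t) := by
  intro r
  induction r with
  | zero => intro i; simp [pvSum]
  | succ r ih =>
    intro i
    rw [pvSum, ih (i+1), Finset.sum_range_succ']
    have h1 : ∀ t, i + 1 + 1 + t = i + 1 + (t + 1) := by omega
    simp only [h1, Nat.add_zero]
    ring

-- the visit map t ↦ pvP (t+1) is injective on range steps
theorem pv_injOn (c : List Int) (k : Int) (hn : c ≠ []) :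
    Set.InjOn (fun t => pvP c k (t + 1)) ↑(Finset.range (pvSteps c k)) := by
  have hn0 : 0 < c.length := List.length_pos_of_ne_nil hn
  intro t1 ht1 t2 ht2 heq
  simp only [Finset.coe_range, Set.mem_Iio] at ht1 ht2
  unfold pvP at heq
  have key : ∀ a b : Nat, a ≤ b → b < pvSteps c k →
      ((a+1) * pvK c k) % c.length = ((b+1) * pvK c k) % c.length → a = b := by
    intro a b hab hb hmod
    have hle : (a+1) * pvK c k ≤ (b+1) * pvK c k :=
      Nat.mul_le_mul_right _ (by omega)
    have hdvd : c.length ∣ (b+1) * pvK c k - (a+1) * pvK c k :=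
      (Nat.modEq_iff_dvd' hle).mp hmod
    have hsub : (b+1) * pvK c k - (a+1) * pvK c k = (b - a) * pvK c k := by
      have h' : (b+1) - (a+1) = b - a := by omega
      rw [← Nat.sub_mul, h']
    rw [hsub] at hdvd
    have hst : pvSteps c k ∣ (b - a) := by
      have := (pv_nat_dvd c.length (pvK c k) hn0 (b - a)).mp hdvd
      exact this
    have hz : b - a = 0 := Nat.eq_zero_of_dvd_of_lt hst (by omega)
    omega
  rcases le_total t1 t2 with h | h
  · exact key t1 t2 h ht2 heq
  · exact (key t2 t1 h ht1 heq.symm).symm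

theorem pvG_pos (c : List Int) (k : Int) (hn : c ≠ []) : 0 < pvG c k :=
  Nat.gcd_pos_of_pos_left _ (List.length_pos_of_ne_nil hn)

theorem pvG_mul_steps (c : List Int) (k : Int) (hn : c ≠ []) :
    pvSteps c k * pvG c k = c.length := by
  unfold pvSteps
  exact Nat.div_mul_cancel (Nat.gcd_dvd_left _ _)

theorem pvT_eq_image_mul (c : List Int) (k : Int) (hn : c ≠ []) :
    pvT c k = (Finset.range (pvSteps c k)).image (· * pvG c k) := by
  have hg0 := pvG_pos c k hn
  have hmul := pvG_mul_steps c k hn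
  ext j
  simp only [pvT, Finset.mem_filter, Finset.mem_range, Finset.mem_image]
  constructor
  · rintro ⟨hj, t, rfl⟩
    refine ⟨t, ?_, by ring⟩
    by_contra hlt
    push_neg at hlt
    have : c.length ≤ pvG c k * t := by
      calc c.length = pvSteps c k * pvG c k := hmul.symm
        _ ≤ t * pvG c k := Nat.mul_le_mul_right _ hlt
        _ = pvG c k * t := by ring
    omega
  · rintro ⟨t, ht, rfl⟩
    have hlt : t * pvG c k < c.length := by
      calc t * pvG c k < pvSteps c k * pvG c k := (Nat.mul_lt_mul_right hg0).mpr ht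
        _ = c.length := hmul
    exact ⟨hlt, ⟨t, by ring⟩⟩

theorem pvT_card (c : List Int) (k : Int) (hn : c ≠ []) :
    (pvT c k).card = pvSteps c k := by
  rw [pvT_eq_image_mul c k hn, Finset.card_image_of_injective _
    (fun a b h => Nat.eq_of_mul_eq_mul_right (pvG_pos c k hn) h), Finset.card_range]

theorem pv_image_eq (c : List Int) (k : Int) (hn : c ≠ []) :
    (Finset.range (pvSteps c k)).image (fun t => pvP c k (t + 1)) = pvT c k := by
  have hn0 : 0 < c.length := List.length_pos_of_ne_nil hn
  have hsub : (Finset.range (pvSteps c k)).image (fun t => pvP c k (t + 1)) ⊆ pvT c k := by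
    intro j hj
    simp only [Finset.mem_image, Finset.mem_range] at hj
    obtain ⟨t, _, rfl⟩ := hj
    simp only [pvT, Finset.mem_filter, Finset.mem_range]
    refine ⟨Nat.mod_lt _ hn0, ?_⟩
    unfold pvP pvG
    rw [Nat.dvd_mod_iff (Nat.gcd_dvd_left _ _)]
    exact Dvd.dvd.mul_left (Nat.gcd_dvd_right _ _) _
  refine Finset.eq_of_subset_of_card_le hsub ?_
  rw [pvT_card c k hn, Finset.card_image_of_injOn (pv_injOn c k hn), Finset.card_range]

-- generic fold-count to list-sum
theorem pv_foldl_count {α : Type} (p : α → Prop) [DecidablePred p] :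
    ∀ (l : List α) (s : Int),
      l.foldl (fun s x => if p x then s + 1 else s) s
        = s + (l.map (fun x => if p x then (1:Int) else 0)).sum := by
  intro l
  induction l with
  | nil => intro s; simp
  | cons x xs ih =>
    intro s
    simp only [List.foldl_cons, List.map_cons, List.sum_cons, ih]
    split <;> ring

theorem pv_list_sum_range (f : Nat → Int) (n : Nat) :
    ((List.range n).map f).sum = ∑ t ∈ Finset.range n, f t := by
  induction n with
  | zero => simp
  | succ n ih => simp [List.range_succ, Finset.sum_range_succ, ih]

-- B's fold over enumerate, as a Finset sum over all indices
theorem pv_ones_eq (c : List Int) (k : Int) (hn : c ≠ []) :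
    (PySem.List.enumerate c).foldl
      (fun s jv => if PySem.Int.mod jv.1 ((pvG c k : Nat) : Int) = 0 ∧ jv.2 = 1 then s + 1 else s) (0 : Int)
      = ∑ j ∈ Finset.range c.length,
          (if pvG c k ∣ j then pvInd c j else 0) := by
  have hg0 := pvG_pos c k hn
  have hgI : (0:Int) < ((pvG c k : Nat) : Int) := by exact_mod_cast hg0
  rw [PySem.List.enumerate_eq_map_pyRange (d := 0), List.foldl_map,
    pv_foldl_count (fun j => PySem.Int.mod j ((pvG c k : Nat) : Int) = 0
      ∧ (PySem.List.pyGetD c j 0) = 1)]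
  rw [PySem.List.pyRange_one, List.map_map, pv_list_sum_range, zero_add]
  have hN : ((PySem.List.len c) - 0).toNat = c.length := by
    simp [PySem.List.len_eq]
  rw [hN]
  apply Finset.sum_congr rfl
  intro j hj
  simp only [Finset.mem_range] at hj
  simp only [Function.comp]
  simp only [zero_add]
  have hmod : PySem.Int.mod (j:Int) ((pvG c k : Nat) : Int) = 0 ↔ pvG c k ∣ j := by
    rw [PySem.Int.mod_eq_emod_of_pos hgI]
    constructor
    · intro h
      exact_mod_cast Int.dvd_of_emod_eq_zero h
    · intro h
      exact Int.emod_eq_zero_of_dvd (by exact_mod_cast h)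
  have hget : PySem.List.pyGetD c (j:Int) 0 = (PySem.List.pyGet? c ((j:Nat):Int)).getD 0 := by
    simp [PySem.List.pyGetD, PySem.List.pyGet?]
  rw [hget]
  unfold pvInd
  by_cases hd : pvG c k ∣ j
  · simp only [hd, iff_true] at hmod
    simp only [hmod, true_and]
    rw [if_pos hd]
  · simp only [hd, iff_false] at hmod
    rw [if_neg hd, if_neg (fun h => hmod h.1)]

-- ===== VERDICT (by name: the statement is the Claim_ definition above) =====
theorem jumpingOnVClouds_spec : Claim_equal_jumpingOnVClouds := by
  intro c k _ hpre
  unfold Spec_jumpingOnVClouds jumpingOnVClouds jumpingOnVClouds_alt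
  have hn0 : 0 < c.length := List.length_pos_of_ne_nil hpre
  obtain ⟨hK, hKlt⟩ := pvK_spec c k hpre
  have hp1 : (pvK c k : Int) = (pvP c k 1 : Int) := by
    unfold pvP; rw [one_mul, Nat.mod_eq_of_lt hKlt]
  have hgcd : pyGcd c.length (PySem.Int.mod k (c.length : Int)).toNat = pvG c k := by
    rw [pyGcd_eq]; rfl
  have hs1 : 1 ≤ pvSteps c k := pvSteps_pos c k hpre
  simp only [PySem.List.len_eq]
  rw [hgcd]
  simp only [hK, hp1]
  rw [jloop_eq c k hpre c.length 1 _ le_rfl hs1 (by have := pvSteps_le c k; omega)]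
  -- A's energy = 100 - pvSum 0 steps
  have hA : (if (PySem.List.pyGet? c ((pvP c k 1 : Nat) : Int)).getD 0 = 1 then (100:Int) - 3 else 100 - 1)
      - pvSum c k 1 (pvSteps c k - 1) = 100 - pvSum c k 0 (pvSteps c k) := by
    have h : pvSteps c k = (pvSteps c k - 1) + 1 := by omega
    rw [h, pvSum]
    unfold pvCost pvPosCost
    simp only [Nat.zero_add, Nat.sub_add_cancel hs1]
    split <;> ring
  rw [hA]
  -- the cost sum as a sum over visited positions, then over multiples of g
  have hsum : pvSum c k 0 (pvSteps c k)
      = ∑ j ∈ pvT c k, pvPosCost c j := by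
    rw [pvSum_eq_sum c k (pvSteps c k) 0, ← pv_image_eq c k hpre,
      Finset.sum_image (fun a ha b hb h => pv_injOn c k hpre ha hb h)]
    apply Finset.sum_congr rfl
    intro t _
    have h : 0 + 1 + t = t + 1 := by omega
    rw [h]
    rfl
  -- split each cost into 1 + 2·indicator
  have hcost : ∑ j ∈ pvT c k, pvPosCost c j
      = (pvSteps c k : Int) + 2 * ∑ j ∈ pvT c k, pvInd c j := by
    have h1 : ∀ j, pvPosCost c j = 1 + 2 * pvInd c j := by
      intro j; unfold pvPosCost pvInd; split <;> ring
    rw [Finset.sum_congr rfl (fun j _ => h1 j), Finset.sum_add_distrib,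
      Finset.sum_const, pvT_card c k hpre, ← Finset.mul_sum]
    ring
  -- the indicator sum over pvT is B's ones-count
  have hones : ∑ j ∈ pvT c k, pvInd c j
      = ∑ j ∈ Finset.range c.length, (if pvG c k ∣ j then pvInd c j else 0) := by
    rw [pvT, Finset.sum_filter]
  rw [hsum, hcost, hones, ← pv_ones_eq c k hpre]
  have hstepsI : ((c.length / pvG c k : Nat) : Int) = (pvSteps c k : Int) := rfl
  rw [hstepsI]
  ring
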